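-- pv_equiv track=rewrite | github.com/AlexZander73/TuxbornWebsite | scripts/sync_checklist.py | pick_label
-- ===== SOURCE A (Python) =====
-- def pick_label(headers, row):
--     priorities = ["quest", "mod", "item", "name", "title"]
--     for key in priorities:
--         for idx, header in enumerate(headers):
--             if key in header.lower() and idx < len(row) and row[idx].strip():
--                 return row[idx].strip()
--     for idx, cell in enumerate(row):
--         if cell.strip():
--             return cell.strip()
--     return "(unnamed)"
-- ===== SOURCE B (Python) =====
-- def pick_label(headers, row):
--     priorities = ["quest", "mod", "item", "name", "title"]
--     best = None  # (rank, value): smallest rank wins, earliest header breaks ties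
--     for idx, header in enumerate(headers):
--         if idx >= len(row):
--             continue
--         v = row[idx].strip()
--         if not v:
--             continue
--         h = header.lower()
--         rank = None
--         for r, key in enumerate(priorities):
--             if key in h:
--                 rank = r
--                 break
--         if rank is None:
--             continue
--         if best is None or rank < best[0]:
--             best = (rank, v)
--     if best is not None:
--         return best[1]
--     for cell in row:
--         v = cell.strip()
--         if v:
--             return v
--     return "(unnamed)"
-- ===== Notes on version B (the rewrite author's own statement) =====
-- stated objective: alternative
-- what changed: Replaces A's priority-outer/header-inner repeated scans (and its separate enumerate passes) with a single pass over the headers that keeps a running best (rank, value), where a header's rank is the first matching priority keyword; strict-less updates preserve A's earliest-header tie-breaking.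
import Mathlib
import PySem

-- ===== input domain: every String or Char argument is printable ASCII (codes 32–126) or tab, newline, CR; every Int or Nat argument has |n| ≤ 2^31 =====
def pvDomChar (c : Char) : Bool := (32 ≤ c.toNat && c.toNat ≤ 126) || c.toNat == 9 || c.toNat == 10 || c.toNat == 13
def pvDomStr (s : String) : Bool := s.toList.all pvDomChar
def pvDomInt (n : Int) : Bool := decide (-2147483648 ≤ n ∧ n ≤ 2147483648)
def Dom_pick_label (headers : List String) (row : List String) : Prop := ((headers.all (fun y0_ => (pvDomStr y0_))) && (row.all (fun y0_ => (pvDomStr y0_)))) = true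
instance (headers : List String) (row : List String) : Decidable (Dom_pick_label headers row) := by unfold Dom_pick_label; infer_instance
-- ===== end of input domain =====

-- B replaces A's priority-outer/header-inner repeated scan by a single pass over the headers
-- keeping a running best (rank, value); alternative decomposition, same result.

-- ===== PORT A =====
def pick_label (headers : List String) (row : List String) : String :=
  match ((["quest", "mod", "item", "name", "title"] : List String).findSome? (fun key =>
      (PySem.List.enumerate headers).findSome? (fun p =>
        if PySem.Str.isIn key (PySem.Str.lower p.2) ∧ p.1 < (row.length : Int) ∧
            PySem.Str.strip (PySem.List.pyGetD row p.1 "") ≠ "" then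
          some (PySem.Str.strip (PySem.List.pyGetD row p.1 ""))
        else none))) with
  | some v => v
  | none =>
    match (PySem.List.enumerate row).findSome? (fun p =>
        if PySem.Str.strip p.2 ≠ "" then some (PySem.Str.strip p.2) else none) with
    | some v => v
    | none => "(unnamed)"

-- ===== PORT B =====
-- rank of a header: first index in the priority list whose keyword occurs in the lowered header
def pbRank (header : String) : Option Nat :=
  (["quest", "mod", "item", "name", "title"] : List String).findIdx?
    (fun key => PySem.Str.isIn key (PySem.Str.lower header))

-- one step of B's single pass: update the running best (rank, stripped value)
def pbStep (row : List String) (best : Option (Nat × String)) (p : Int × String) :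
    Option (Nat × String) :=
  match PySem.List.pyGet? row p.1 with
  | none => best
  | some cell =>
    let v := PySem.Str.strip cell
    if v = "" then best
    else
      match pbRank p.2 with
      | none => best
      | some rank =>
        match best with
        | none => some (rank, v)
        | some (br, _) => if rank < br then some (rank, v) else best

def pick_label_alt (headers : List String) (row : List String) : String :=
  match (PySem.List.enumerate headers).foldl (pbStep row) none with
  | some (_, v) => v
  | none =>
    match row.findSome? (fun cell =>
        if PySem.Str.strip cell ≠ "" then some (PySem.Str.strip cell) else none) with
    | some v => v
    | none => "(unnamed)"

-- ===== PRECONDITION & SPEC =====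
def Spec_pick_label (headers : List String) (row : List String) (out : String) : Prop := out = pick_label_alt headers row
instance (headers : List String) (row : List String) (out : String) : Decidable (Spec_pick_label headers row out) := by unfold Spec_pick_label; infer_instance

-- ===== CLAIM (what is proved, stated in full; the proofs are below) =====
def Claim_equal_pick_label : Prop := ∀ (headers : List String) (row : List String), Dom_pick_label headers row → Spec_pick_label headers row (pick_label headers row)

-- ===== LEMMAS AND PROOFS =====

-- A's inner scan for one key, phrased over header/cell pairs
def pvZipF (k : String) (q : String × String) : Option String :=
  if PySem.Str.isIn k (PySem.Str.lower q.1) ∧ PySem.Str.strip q.2 ≠ "" then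
    some (PySem.Str.strip q.2) else none

def pvZipA (k : String) (pairs : List (String × String)) : Option String :=
  pairs.findSome? (pvZipF k)

-- candidates: (rank, stripped value) for each pair whose cell is nonempty and header has a rank
def pvCands (K : List String) (pairs : List (String × String)) : List (Nat × String) :=
  pairs.filterMap (fun q =>
    if PySem.Str.strip q.2 = "" then none
    else (K.findIdx? (fun key => PySem.Str.isIn key (PySem.Str.lower q.1))).map
      (fun r => (r, PySem.Str.strip q.2)))

-- B's step over pairs
def pvZStep (best : Option (Nat × String)) (q : String × String) : Option (Nat × String) :=
  if PySem.Str.strip q.2 = "" then best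
  else
    match pbRank q.1 with
    | none => best
    | some rank =>
      match best with
      | none => some (rank, PySem.Str.strip q.2)
      | some (br, _) => if rank < br then some (rank, PySem.Str.strip q.2) else best

-- A's inner enumerate loop = scan over headers zipped with the row
lemma pv_inner_zip (k : String) (headers : List String) :
    ∀ (row : List String) (s : Nat),
      (PySem.List.enumerate headers (s : Int)).findSome? (fun p =>
        if PySem.Str.isIn k (PySem.Str.lower p.2) ∧ p.1 < (row.length : Int) ∧
            PySem.Str.strip (PySem.List.pyGetD row p.1 "") ≠ "" then
          some (PySem.Str.strip (PySem.List.pyGetD row p.1 ""))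
        else none) = pvZipA k (headers.zip (row.drop s)) := by
  induction headers with
  | nil => intro row s; rfl
  | cons h hs ih =>
    intro row s
    rw [PySem.List.enumerate_cons, List.findSome?_cons]
    have hrec : PySem.List.enumerate hs ((s : Int) + 1) = PySem.List.enumerate hs ((s + 1 : Nat) : Int) := by
      push_cast; ring_nf
    by_cases hlt : s < row.length
    · have hg : PySem.List.pyGetD row (s : Int) "" = row[s] := by
        simp [PySem.List.pyGetD_natCast, List.getD_eq_getElem?_getD, List.getElem?_eq_getElem hlt]
      rw [List.drop_eq_getElem_cons hlt, List.zip_cons_cons]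
      have hm : ((s : Int) < (row.length : Int)) := by exact_mod_cast hlt
      by_cases hc : PySem.Str.isIn k (PySem.Str.lower h) = true ∧ PySem.Str.strip row[s] ≠ ""
      · have hf : pvZipF k (h, row[s]) = some (PySem.Str.strip row[s]) := by
          unfold pvZipF; exact if_pos ⟨hc.1, hc.2⟩
        rw [if_pos ⟨hc.1, hm, by rw [hg]; exact hc.2⟩, hg]
        conv_rhs => rw [pvZipA, List.findSome?_cons, hf]
      · have hne : ¬ (PySem.Str.isIn k (PySem.Str.lower h) = true ∧ (s : Int) < (row.length : Int) ∧
            PySem.Str.strip (PySem.List.pyGetD row (s : Int) "") ≠ "") := by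
          rintro ⟨a, _, b⟩; rw [hg] at b; exact hc ⟨a, b⟩
        have hf : pvZipF k (h, row[s]) = none := by
          unfold pvZipF; exact if_neg hc
        rw [if_neg hne]
        conv_rhs => rw [pvZipA, List.findSome?_cons, hf]
        rw [hrec, ih row (s + 1)]
        rfl
    · have hd1 : row.drop s = [] := List.drop_eq_nil_of_le (Nat.le_of_not_lt hlt)
      have hd2 : row.drop (s + 1) = [] := List.drop_eq_nil_of_le (by omega)
      have : ¬ (PySem.Str.isIn k (PySem.Str.lower h) = true ∧ (s : Int) < (row.length : Int) ∧
          PySem.Str.strip (PySem.List.pyGetD row (s : Int) "") ≠ "") := by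
        intro ⟨_, hmid, _⟩
        exact hlt (by exact_mod_cast hmid)
      rw [if_neg this, hrec, ih row (s + 1), hd1, hd2]
      simp [pvZipA]

-- B's enumerate fold = fold over headers zipped with the row
lemma pv_fold_zip (headers : List String) :
    ∀ (row : List String) (s : Nat) (acc : Option (Nat × String)),
      (PySem.List.enumerate headers (s : Int)).foldl (pbStep row) acc
        = (headers.zip (row.drop s)).foldl pvZStep acc := by
  induction headers with
  | nil => intro row s acc; rfl
  | cons h hs ih =>
    intro row s acc
    rw [PySem.List.enumerate_cons, List.foldl_cons]
    have hrec : PySem.List.enumerate hs ((s : Int) + 1) = PySem.List.enumerate hs ((s + 1 : Nat) : Int) := by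
      push_cast; ring_nf
    by_cases hlt : s < row.length
    · have hg : PySem.List.pyGet? row (s : Int) = some row[s] := by
        simp [List.getElem?_eq_getElem hlt]
      rw [List.drop_eq_getElem_cons hlt, List.zip_cons_cons, List.foldl_cons]
      have hstep : pbStep row acc ((s : Int), h) = pvZStep acc (h, row[s]) := by
        simp only [pbStep, pvZStep, hg]
      rw [hstep, hrec, ih row (s + 1)]
    · have hg : PySem.List.pyGet? row (s : Int) = none := by
        simp [List.getElem?_eq_none_iff.mpr (Nat.le_of_not_lt hlt)]
      have hd1 : row.drop s = [] := List.drop_eq_nil_of_le (Nat.le_of_not_lt hlt)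
      have hd2 : row.drop (s + 1) = [] := List.drop_eq_nil_of_le (by omega)
      have hstep : pbStep row acc ((s : Int), h) = acc := by
        simp only [pbStep, hg]
      rw [hstep, hrec, ih row (s + 1), hd1, hd2, List.zip_nil_right, List.zip_nil_right]

-- pvCands at the concrete priority list, phrased through pbRank
lemma pv_cands_P (pairs : List (String × String)) :
    pvCands ["quest", "mod", "item", "name", "title"] pairs
      = pairs.filterMap (fun q =>
          if PySem.Str.strip q.2 = "" then none
          else (pbRank q.1).map (fun r => (r, PySem.Str.strip q.2))) := rfl

-- B's fold over pairs is argmin-by-rank of the candidate list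
lemma pv_fold_argmin (pairs : List (String × String)) :
    ∀ (acc : Option (Nat × String)),
      pairs.foldl pvZStep acc
        = (pvCands ["quest", "mod", "item", "name", "title"] pairs).foldl
            (List.argAux (fun b c : Nat × String => b.1 < c.1)) acc := by
  induction pairs with
  | nil => intro acc; rfl
  | cons q rest ih =>
    intro acc
    rw [pv_cands_P, List.filterMap_cons] at *
    by_cases h1 : PySem.Str.strip q.2 = ""
    · simpa [pvZStep, h1] using ih acc
    · cases h2 : pbRank q.1 with
      | none => simpa [pvZStep, h1, h2] using ih acc
      | some r =>
        simp only [h1, Option.map_some, List.foldl_cons]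
        have hstep : pvZStep acc q = List.argAux (fun b c : Nat × String => b.1 < c.1) acc
            (r, PySem.Str.strip q.2) := by
          cases acc with
          | none => simp [pvZStep, h1, h2, List.argAux]
          | some b => cases b; simp [pvZStep, h1, h2, List.argAux]
        rw [hstep]
        exact ih _

lemma pv_cands_nil (pairs : List (String × String)) : pvCands [] pairs = [] := by
  simp [pvCands]

-- if no pair matches key k, candidates for k::K are the K-candidates with ranks shifted up
lemma pv_cands_shift (k : String) (K : List String) (pairs : List (String × String))
    (h : pvZipA k pairs = none) :
    pvCands (k :: K) pairs = (pvCands K pairs).map (fun p => (p.1 + 1, p.2)) := by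
  induction pairs with
  | nil => simp [pvCands]
  | cons q rest ih =>
    have hq : pvZipF k q = none ∧ pvZipA k rest = none := by
      rw [pvZipA, List.findSome?_cons] at h
      cases hq' : pvZipF k q with
      | some v => rw [hq'] at h; simp at h
      | none => rw [hq'] at h; exact ⟨rfl, h⟩
    have hrest := ih hq.2
    have hcond : ¬ (PySem.Str.isIn k (PySem.Str.lower q.1) = true ∧ PySem.Str.strip q.2 ≠ "") := by
      intro hc
      have := hq.1
      rw [pvZipF, if_pos hc] at this
      exact Option.some_ne_none _ this
    by_cases h1 : PySem.Str.strip q.2 = ""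
    · simp only [pvCands, List.filterMap_cons, if_pos h1] at hrest ⊢
      exact hrest
    · have h2 : PySem.Str.isIn k (PySem.Str.lower q.1) = false :=
        Bool.eq_false_iff.mpr (fun a => hcond ⟨a, h1⟩)
      simp only [pvCands, List.filterMap_cons, if_neg h1, List.findIdx?_cons, h2] at hrest ⊢
      cases h3 : K.findIdx? (fun key => PySem.Str.isIn key (PySem.Str.lower q.1)) with
      | none => simpa [h3] using hrest
      | some r => simpa [h3] using hrest

-- argmin commutes with shifting every rank up by one
lemma pv_argmin_shift (l : List (Nat × String)) :
    List.argmin Prod.fst (l.map (fun p => (p.1 + 1, p.2)))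
      = (List.argmin Prod.fst l).map (fun p => (p.1 + 1, p.2)) := by
  induction l with
  | nil => rfl
  | cons a l ih =>
    rw [List.map_cons, List.argmin_cons, List.argmin_cons, ih]
    cases h : List.argmin Prod.fst l with
    | none => simp
    | some c => cases c; cases a; simp only [Option.map_some]; split_ifs <;> simp_all

-- if some pair matches key k, the argmin of the k::K candidates is (0, first such value)
lemma pv_argmin_hit (k : String) (K : List String) (pairs : List (String × String)) (v : String)
    (h : pvZipA k pairs = some v) :
    List.argmin Prod.fst (pvCands (k :: K) pairs) = some (0, v) := by
  induction pairs with
  | nil => simp [pvZipA] at h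
  | cons q rest ih =>
    rw [pvZipA, List.findSome?_cons] at h
    cases hq : pvZipF k q with
    | some w =>
      rw [hq] at h
      have hw : w = v := by simpa using h
      subst hw
      have hc : PySem.Str.isIn k (PySem.Str.lower q.1) = true ∧ PySem.Str.strip q.2 ≠ "" := by
        by_contra hc
        rw [pvZipF, if_neg hc] at hq
        exact Option.some_ne_none _ hq.symm
      have hv : PySem.Str.strip q.2 = w := by
        have := hq
        rw [pvZipF, if_pos hc] at this
        simpa using this
      have hhead : pvCands (k :: K) (q :: rest)
          = (0, w) :: pvCands (k :: K) rest := by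
        simp only [pvCands, List.filterMap_cons, if_neg (hv ▸ hc.2), List.findIdx?_cons,
          hc.1, hv]
        rfl
      rw [hhead, List.argmin_cons]
      cases hm : List.argmin Prod.fst (pvCands (k :: K) rest) with
      | none => rfl
      | some c => simp
    | none =>
      rw [hq] at h
      have ihr := ih h
      have hcond : ¬ (PySem.Str.isIn k (PySem.Str.lower q.1) = true ∧ PySem.Str.strip q.2 ≠ "") := by
        intro hc
        rw [pvZipF, if_pos hc] at hq
        exact Option.some_ne_none _ hq
      by_cases h1 : PySem.Str.strip q.2 = ""
      · rw [show pvCands (k :: K) (q :: rest) = pvCands (k :: K) rest from by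
          simp [pvCands, h1]]
        exact ihr
      · have h2 : PySem.Str.isIn k (PySem.Str.lower q.1) = false :=
          Bool.eq_false_iff.mpr (fun a => hcond ⟨a, h1⟩)
        cases h3 : K.findIdx? (fun key => PySem.Str.isIn key (PySem.Str.lower q.1)) with
        | none =>
          simp only [] at h2 h3
          rw [show pvCands (k :: K) (q :: rest) = pvCands (k :: K) rest from by
            simp only [pvCands, List.filterMap_cons, if_neg h1, List.findIdx?_cons, h2,
              Bool.false_eq_true, if_false, h3, Option.map_none]]
          exact ihr
        | some r =>
          rw [show pvCands (k :: K) (q :: rest)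
              = (r + 1, PySem.Str.strip q.2) :: pvCands (k :: K) rest from by
            simp only [pvCands, List.filterMap_cons, if_neg h1, List.findIdx?_cons, h2,
              Bool.false_eq_true, if_false, h3, Option.map_some]]
          rw [List.argmin_cons, ihr]
          simp

-- main: A's nested loops over a key list = value of the rank-argmin over the candidates
lemma pv_main (K : List String) (pairs : List (String × String)) :
    K.findSome? (fun k => pvZipA k pairs)
      = (List.argmin Prod.fst (pvCands K pairs)).map Prod.snd := by
  induction K with
  | nil => simp [pv_cands_nil]
  | cons k K ih =>
    rw [List.findSome?_cons]
    cases h : pvZipA k pairs with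
    | some v => rw [pv_argmin_hit k K pairs v h]; rfl
    | none =>
      rw [ih, pv_cands_shift k K pairs h, pv_argmin_shift, Option.map_map]
      simp [Function.comp_def]

-- A's fallback enumerate loop ignores the index
lemma pv_fallback (row : List String) : ∀ (s : Int),
    (PySem.List.enumerate row s).findSome? (fun p =>
        if PySem.Str.strip p.2 ≠ "" then some (PySem.Str.strip p.2) else none)
      = row.findSome? (fun cell =>
        if PySem.Str.strip cell ≠ "" then some (PySem.Str.strip cell) else none) := by
  induction row with
  | nil => intro s; rfl
  | cons c rest ih =>
    intro s
    simp only [PySem.List.enumerate_cons, List.findSome?_cons]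
    split_ifs <;> simp_all

-- ===== VERDICT (by name: the statement is the Claim_ definition above) =====
theorem pick_label_spec : Claim_equal_pick_label := by
  intro headers row _
  unfold Spec_pick_label pick_label pick_label_alt
  have hinner : (fun key => (PySem.List.enumerate headers).findSome? (fun p =>
        if PySem.Str.isIn key (PySem.Str.lower p.2) ∧ p.1 < (row.length : Int) ∧
            PySem.Str.strip (PySem.List.pyGetD row p.1 "") ≠ "" then
          some (PySem.Str.strip (PySem.List.pyGetD row p.1 ""))
        else none))
      = (fun k => pvZipA k (headers.zip row)) := by
    funext k
    have h0 := pv_inner_zip k headers row 0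
    simpa using h0
  rw [hinner, pv_main]
  have hfold : (PySem.List.enumerate headers).foldl (pbStep row) none
      = List.argmin Prod.fst (pvCands ["quest", "mod", "item", "name", "title"]
          (headers.zip row)) := by
    have h0 := pv_fold_zip headers row 0 none
    simp only [Nat.cast_zero, List.drop_zero] at h0
    rw [h0, pv_fold_argmin]
    rfl
  rw [hfold]
  cases harg : List.argmin Prod.fst
      (pvCands ["quest", "mod", "item", "name", "title"] (headers.zip row)) with
  | none => simp only [Option.map_none]; rw [pv_fallback row 0]
  | some c => cases c; simp only [Option.map_some]
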